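-- pv_equiv track=rewrite | github.com/Rvs006/edq | server/backend/app/services/evaluation.py | _eval_u09
-- ===== SOURCE A (Python) =====
-- _SERVICE_LABELS = {
--     "ftp": "FTP",
--     "ssh": "SSH",
--     "http": "HTTP",
--     "https": "HTTPS",
--     "ssl/http": "HTTPS",
--     "ssl/https": "HTTPS",
--     "netbios-ssn": "SAMBA",
--     "microsoft-ds": "SAMBA",
--     "domain": "DNS",
--     "domain?": "DNS",
--     "ntp": "NTP",
--     "bacnet": "BACNET",
--     "bacnet-ip": "BACNET",
-- }
--
-- def _service_label(raw: str | None) -> str: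
--     value = (raw or "").strip().lower()
--     if not value:
--         return "UNKNOWN"
--     return _SERVICE_LABELS.get(value, value.upper())
--
-- def _eval_u09(data: dict, wl: list) -> tuple[str, str]:
--     """Protocol Whitelist Compliance."""
--     open_ports = set()
--     for p in data.get("open_ports", []):
--         open_ports.add(int(p["port"]))
--
--     if not open_ports:
--         return ("pass", "Whitelist Compliance — No open ports to compare against whitelist.")
--
--     allowed_ports = set()
--     for entry in wl:
--         port_val = entry.get("port")
--         if port_val is not None:
--             allowed_ports.add(int(port_val))
--
--     non_compliant = sorted(open_ports - allowed_ports)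
--     if non_compliant:
--         port_details = {int(p["port"]): p for p in data.get("open_ports", [])}
--         details = []
--         for port in non_compliant:
--             port_info = port_details.get(port, {})
--             protocol = (port_info.get("protocol") or "tcp").upper()
--             service = _service_label(port_info.get("service"))
--             if service in {"FTP", "TELNET", "SAMBA"}:
--                 suffix = "disable." if service in {"FTP", "TELNET"} else "disable if not required."
--             else:
--                 suffix = "review and disable if not required."
--             details.append(f"{protocol} port {port}: {service} found open, {suffix}")
--         return ("fail", "Whitelist Compliance — Non-whitelisted ports open.\n" + "\n".join(details))
--     return ("pass", "Whitelist Compliance — All open ports match the protocol whitelist.")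
-- ===== SOURCE B (Python) =====
-- _SERVICE_LABELS = {
--     "ftp": "FTP",
--     "ssh": "SSH",
--     "http": "HTTP",
--     "https": "HTTPS",
--     "ssl/http": "HTTPS",
--     "ssl/https": "HTTPS",
--     "netbios-ssn": "SAMBA",
--     "microsoft-ds": "SAMBA",
--     "domain": "DNS",
--     "domain?": "DNS",
--     "ntp": "NTP",
--     "bacnet": "BACNET",
--     "bacnet-ip": "BACNET",
-- }
--
-- _SUFFIXES = {
--     "FTP": "disable.",
--     "TELNET": "disable.",
--     "SAMBA": "disable if not required.",
-- }
--
--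
-- def _label(raw):
--     value = (raw or "").strip().lower()
--     if not value:
--         return "UNKNOWN"
--     return _SERVICE_LABELS.get(value, value.upper())
--
--
-- def _describe(port, info):
--     protocol = (info.get("protocol") or "tcp").upper()
--     service = _label(info.get("service"))
--     suffix = _SUFFIXES.get(service, "review and disable if not required.")
--     return f"{protocol} port {port}: {service} found open, {suffix}"
--
--
-- def _eval_u09(data: dict, wl: list) -> tuple[str, str]:
--     """Protocol Whitelist Compliance."""
--     # index every open-port entry by its integer port in one pass (last duplicate wins)
--     port_map = {}
--     for p in data.get("open_ports", []):
--         port_map[int(p["port"])] = p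
--     if not port_map:
--         return ("pass", "Whitelist Compliance — No open ports to compare against whitelist.")
--
--     open_sorted = sorted(port_map)
--     allowed = set()
--     for entry in wl:
--         pv = entry.get("port")
--         if pv is not None:
--             allowed.add(int(pv))
--     allowed_sorted = sorted(allowed)
--
--     # two-pointer merge walk over the two sorted lists: collect the open ports
--     # that the allowed list skips over (no set difference, no hashing here)
--     non_compliant = []
--     i = j = 0
--     while i < len(open_sorted):
--         if j == len(allowed_sorted) or open_sorted[i] < allowed_sorted[j]:
--             non_compliant.append(open_sorted[i])
--             i += 1
--         elif open_sorted[i] == allowed_sorted[j]: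
--             i += 1
--             j += 1
--         else:
--             j += 1
--
--     if not non_compliant:
--         return ("pass", "Whitelist Compliance — All open ports match the protocol whitelist.")
--     details = [_describe(port, port_map[port]) for port in non_compliant]
--     return ("fail", "Whitelist Compliance — Non-whitelisted ports open.\n" + "\n".join(details))
-- ===== Notes on version B (the rewrite author's own statement) =====
-- stated objective: alternative
-- what changed: B indexes the open-port entries once into a port->entry dict, sorts its keys and the whitelist ports, and computes the non-compliant ports by a two-pointer merge walk over the two sorted lists (A builds an int set, takes a hash set difference, sorts it and re-scans the input list into a second dict); the message suffix comes from a lookup table instead of A's nested membership conditionals.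
import Mathlib
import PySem

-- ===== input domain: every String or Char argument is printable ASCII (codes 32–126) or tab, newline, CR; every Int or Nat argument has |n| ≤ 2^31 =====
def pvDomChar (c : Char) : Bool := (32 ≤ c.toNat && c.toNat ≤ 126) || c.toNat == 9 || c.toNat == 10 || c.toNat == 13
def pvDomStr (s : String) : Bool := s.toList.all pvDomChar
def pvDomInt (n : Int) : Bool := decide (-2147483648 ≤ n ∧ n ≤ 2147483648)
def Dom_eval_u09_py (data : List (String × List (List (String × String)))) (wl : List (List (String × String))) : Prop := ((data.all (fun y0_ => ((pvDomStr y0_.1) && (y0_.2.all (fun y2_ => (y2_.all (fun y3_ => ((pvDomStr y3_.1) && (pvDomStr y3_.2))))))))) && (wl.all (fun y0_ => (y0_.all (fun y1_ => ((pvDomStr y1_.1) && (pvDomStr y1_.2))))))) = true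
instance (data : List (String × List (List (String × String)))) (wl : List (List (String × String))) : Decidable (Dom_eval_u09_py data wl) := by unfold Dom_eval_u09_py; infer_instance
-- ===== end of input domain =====

-- B replaces A's hash set difference + second scan of the input by one port->entry index,
-- sorting both port lists and a two-pointer merge walk collecting the non-whitelisted ports;
-- the suffix comes from a lookup table instead of nested membership conditionals.

-- shared module context: _SERVICE_LABELS and the service-label helper, identical in both sources
def pvServiceLabels : PySem.Dict String String :=
  PySem.Dict.mk [("ftp", "FTP"), ("ssh", "SSH"), ("http", "HTTP"), ("https", "HTTPS"),
    ("ssl/http", "HTTPS"), ("ssl/https", "HTTPS"), ("netbios-ssn", "SAMBA"),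
    ("microsoft-ds", "SAMBA"), ("domain", "DNS"), ("domain?", "DNS"), ("ntp", "NTP"),
    ("bacnet", "BACNET"), ("bacnet-ip", "BACNET")]

def pvServiceLabel (raw : Option String) : String :=
  let value := PySem.Str.lower (PySem.Str.strip (raw.getD ""))
  if value = "" then "UNKNOWN"
  else pvServiceLabels.getD value (PySem.Str.upper value)

-- ===== PORT A =====
-- int(p["port"]) as a total function: Pre_ guarantees the key exists and parses
def eval_u09_py (data : List (String × List (List (String × String)))) (wl : List (List (String × String))) : String × String :=
  let openList := (PySem.Dict.mk data).getD "open_ports" []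
  let open_ports : PySem.Set Int :=
    openList.foldl (fun s p => PySem.Set.add s ((((PySem.Dict.mk p).get? "port").bind PySem.Int.ofStr?).getD 0)) PySem.Set.empty
  if open_ports = [] then
    ("pass", "Whitelist Compliance — No open ports to compare against whitelist.")
  else
    let allowed_ports : PySem.Set Int :=
      wl.foldl (fun s entry =>
        match (PySem.Dict.mk entry).get? "port" with
        | none => s
        | some v => PySem.Set.add s ((PySem.Int.ofStr? v).getD 0)) PySem.Set.empty
    let non_compliant := PySem.List.sorted (PySem.Set.diff open_ports allowed_ports) (fun x => x) false
    if non_compliant ≠ [] then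
      let port_details : PySem.Dict Int (List (String × String)) :=
        openList.foldl (fun d p => d.insert ((((PySem.Dict.mk p).get? "port").bind PySem.Int.ofStr?).getD 0) p) PySem.Dict.empty
      let details := non_compliant.foldl (fun acc port =>
        let port_info := port_details.getD port []
        let protocol := PySem.Str.upper (match (PySem.Dict.mk port_info).get? "protocol" with
          | none => "tcp"
          | some s => if s = "" then "tcp" else s)
        let service := pvServiceLabel ((PySem.Dict.mk port_info).get? "service")
        let suffix := if service = "FTP" ∨ service = "TELNET" ∨ service = "SAMBA" then
            (if service = "FTP" ∨ service = "TELNET" then "disable." else "disable if not required.")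
          else "review and disable if not required."
        acc ++ [protocol ++ " port " ++ PySem.Int.toStr port ++ ": " ++ service ++ " found open, " ++ suffix]) []
      ("fail", "Whitelist Compliance — Non-whitelisted ports open.\n" ++ PySem.Str.join "\n" details)
    else
      ("pass", "Whitelist Compliance — All open ports match the protocol whitelist.")

-- ===== PORT B =====
def pvSuffixes : PySem.Dict String String :=
  PySem.Dict.mk [("FTP", "disable."), ("TELNET", "disable."), ("SAMBA", "disable if not required.")]

def pvDescribe (port : Int) (info : List (String × String)) : String :=
  let protocol := PySem.Str.upper (match (PySem.Dict.mk info).get? "protocol" with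
    | none => "tcp"
    | some s => if s = "" then "tcp" else s)
  let service := pvServiceLabel ((PySem.Dict.mk info).get? "service")
  let suffix := pvSuffixes.getD service "review and disable if not required."
  protocol ++ " port " ++ PySem.Int.toStr port ++ ": " ++ service ++ " found open, " ++ suffix

-- Source B's while-loop with indices i, j, transcribed as the structural recursion on the two
-- sorted suffixes: emit open ports the allowed pointer skips over
def pvDiffMerge : List Int → List Int → List Int
  | [], _ => []
  | x :: xs, [] => x :: pvDiffMerge xs []
  | x :: xs, y :: ys =>
    if x < y then x :: pvDiffMerge xs (y :: ys)
    else if x = y then pvDiffMerge xs ys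
    else pvDiffMerge (x :: xs) ys
termination_by a b => a.length + b.length

def eval_u09_py_alt (data : List (String × List (List (String × String)))) (wl : List (List (String × String))) : String × String :=
  let port_map : PySem.Dict Int (List (String × String)) :=
    ((PySem.Dict.mk data).getD "open_ports" []).foldl
      (fun d p => d.insert ((((PySem.Dict.mk p).get? "port").bind PySem.Int.ofStr?).getD 0) p) PySem.Dict.empty
  if port_map.items = [] then
    ("pass", "Whitelist Compliance — No open ports to compare against whitelist.")
  else
    let open_sorted := PySem.List.sorted port_map.keys (fun x => x) false
    let allowed : PySem.Set Int :=
      wl.foldl (fun s entry =>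
        match (PySem.Dict.mk entry).get? "port" with
        | none => s
        | some v => PySem.Set.add s ((PySem.Int.ofStr? v).getD 0)) PySem.Set.empty
    let allowed_sorted := PySem.List.sorted allowed (fun x => x) false
    let non_compliant := pvDiffMerge open_sorted allowed_sorted
    if non_compliant = [] then
      ("pass", "Whitelist Compliance — All open ports match the protocol whitelist.")
    else
      let details := non_compliant.map (fun port => pvDescribe port ((port_map.get? port).getD []))
      ("fail", "Whitelist Compliance — Non-whitelisted ports open.\n" ++ PySem.Str.join "\n" details)

-- ===== PRECONDITION & SPEC =====
-- Pre_ excludes exactly the inputs where Python A raises: an open-port entry without a "port"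
-- key or whose "port" value is not int()-parseable (KeyError/ValueError), or a whitelist entry
-- whose "port" value is not int()-parseable (ValueError).
def Pre_eval_u09_py (data : List (String × List (List (String × String)))) (wl : List (List (String × String))) : Prop :=
  ((((PySem.Dict.mk data).getD "open_ports" []).all
      (fun p => (((PySem.Dict.mk p).get? "port").bind PySem.Int.ofStr?).isSome))
   && (wl.all (fun entry =>
        match (PySem.Dict.mk entry).get? "port" with
        | none => true
        | some v => (PySem.Int.ofStr? v).isSome))) = true
instance (data : List (String × List (List (String × String)))) (wl : List (List (String × String))) : Decidable (Pre_eval_u09_py data wl) := by unfold Pre_eval_u09_py; infer_instance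

def pvWitness_eval_u09_py : (List (String × List (List (String × String)))) × (List (List (String × String))) :=
  ([("open_ports", [[("port", "21"), ("service", "ftp")], [("port", "22"), ("service", "ssh")]])],
   [[("port", "22")]])

def Spec_eval_u09_py (data : List (String × List (List (String × String)))) (wl : List (List (String × String))) (out : String × String) : Prop := out = eval_u09_py_alt data wl
instance (data : List (String × List (List (String × String)))) (wl : List (List (String × String))) (out : String × String) : Decidable (Spec_eval_u09_py data wl out) := by unfold Spec_eval_u09_py; infer_instance

-- ===== CLAIM (what is proved, stated in full; the proofs are below) =====
def Claim_equal_eval_u09_py : Prop := ∀ (data : List (String × List (List (String × String)))) (wl : List (List (String × String))), Dom_eval_u09_py data wl → Pre_eval_u09_py data wl → Spec_eval_u09_py data wl (eval_u09_py data wl)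

-- ===== LEMMAS AND PROOFS =====

-- the merge walk over two strictly increasing lists computes the list difference
theorem pvDiffMerge_eq_filter (xs ys : List Int) (hx : xs.Pairwise (· < ·)) (hy : ys.Pairwise (· < ·)) :
    pvDiffMerge xs ys = xs.filter (fun x => decide (x ∉ ys)) := by
  induction xs, ys using pvDiffMerge.induct with
  | case1 ys => rw [pvDiffMerge]; simp
  | case2 x xs ih =>
    rw [pvDiffMerge]
    simp only [List.filter_cons, List.not_mem_nil, not_false_iff, decide_true]
    rw [ih (List.Pairwise.sublist (List.sublist_cons_self x xs) hx) hy]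
    simp
  | case3 x xs y ys hlt ih =>
    rw [pvDiffMerge, if_pos hlt]
    have hxny : x ∉ y :: ys := by
      intro hm
      rcases List.mem_cons.mp hm with h | h
      · omega
      · have := (List.pairwise_cons.mp hy).1 _ h; omega
    rw [List.filter_cons_of_pos (by simpa using hxny)]
    rw [ih (List.Pairwise.sublist (List.sublist_cons_self x xs) hx) hy]
  | case4 xs y ys hnlt ih =>
    rw [pvDiffMerge, if_neg hnlt, if_pos rfl]
    rw [List.filter_cons_of_neg (by simp)]
    rw [ih (List.Pairwise.sublist (List.sublist_cons_self y xs) hx)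
          (List.Pairwise.sublist (List.sublist_cons_self y ys) hy)]
    apply List.filter_congr
    intro z hz
    have hxz : y < z := (List.pairwise_cons.mp hx).1 _ hz
    simp only [decide_eq_decide, List.mem_cons]
    constructor
    · intro h hm; rcases hm with h1 | h1
      · omega
      · exact h h1
    · intro h hm; apply h; right; exact hm
  | case5 x xs y ys hnlt hne ih =>
    rw [pvDiffMerge, if_neg hnlt, if_neg hne]
    rw [ih hx (List.Pairwise.sublist (List.sublist_cons_self y ys) hy)]
    apply List.filter_congr
    intro z hz
    have hyz : y < z := by
      rcases List.mem_cons.mp hz with h | h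
      · omega
      · have := (List.pairwise_cons.mp hx).1 _ h; omega
    simp only [decide_eq_decide, List.mem_cons]
    constructor
    · intro h hm; rcases hm with h1 | h1
      · omega
      · exact h h1
    · intro h hm; apply h; right; exact hm

-- A's running set of int ports IS the key list of B's index (first-insertion order)
theorem pv_open_eq_keys (l : List (List (String × String))) :
    l.foldl (fun s p => PySem.Set.add s ((((PySem.Dict.mk p).get? "port").bind PySem.Int.ofStr?).getD 0)) PySem.Set.empty
      = (l.foldl (fun d p => d.insert ((((PySem.Dict.mk p).get? "port").bind PySem.Int.ofStr?).getD 0) p) PySem.Dict.empty).keys := by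
  rw [PySem.Dict.keys_foldl_insert_key l
        (fun p => (((PySem.Dict.mk p).get? "port").bind PySem.Int.ofStr?).getD 0)
        (fun _ p => p) PySem.Dict.empty,
      ← PySem.Set.update_map_eq_foldl_add]
  rfl

-- A's nested suffix conditionals agree with B's lookup table
theorem pv_suffix_eq (s : String) :
    (if s = "FTP" ∨ s = "TELNET" ∨ s = "SAMBA" then
       (if s = "FTP" ∨ s = "TELNET" then "disable." else "disable if not required.")
     else "review and disable if not required.")
      = pvSuffixes.getD s "review and disable if not required." := by
  by_cases h1 : s = "FTP"
  · subst h1; decide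
  by_cases h2 : s = "TELNET"
  · subst h2; decide
  by_cases h3 : s = "SAMBA"
  · subst h3; decide
  have h1' : ¬("FTP" = s) := fun h => h1 h.symm
  have h2' : ¬("TELNET" = s) := fun h => h2 h.symm
  have h3' : ¬("SAMBA" = s) := fun h => h3 h.symm
  simp [pvSuffixes, PySem.Dict.getD_eq_get?_getD, PySem.Dict.get?, h1, h2, h3, h1', h2', h3']

-- A's inline loop body for one detail line IS B's _describe helper
theorem pv_line_eq (port : Int) (info : List (String × String)) :
    PySem.Str.upper (match (PySem.Dict.mk info).get? "protocol" with
        | none => "tcp"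
        | some s => if s = "" then "tcp" else s)
      ++ " port " ++ PySem.Int.toStr port ++ ": "
      ++ pvServiceLabel ((PySem.Dict.mk info).get? "service")
      ++ " found open, "
      ++ (if pvServiceLabel ((PySem.Dict.mk info).get? "service") = "FTP" ∨
              pvServiceLabel ((PySem.Dict.mk info).get? "service") = "TELNET" ∨
              pvServiceLabel ((PySem.Dict.mk info).get? "service") = "SAMBA" then
            (if pvServiceLabel ((PySem.Dict.mk info).get? "service") = "FTP" ∨
                pvServiceLabel ((PySem.Dict.mk info).get? "service") = "TELNET" then "disable."
             else "disable if not required.")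
          else "review and disable if not required.")
    = pvDescribe port info := by
  simp only [pvDescribe]
  rw [pv_suffix_eq]

-- the whitelist fold keeps the allowed set duplicate-free
theorem pv_allowed_nodup (wl : List (List (String × String))) (s : PySem.Set Int) (hs : s.Nodup) :
    (wl.foldl (fun s entry =>
        match (PySem.Dict.mk entry).get? "port" with
        | none => s
        | some v => PySem.Set.add s ((PySem.Int.ofStr? v).getD 0)) s).Nodup := by
  induction wl generalizing s with
  | nil => exact hs
  | cons e rest ih =>
    simp only [List.foldl_cons]
    cases h : (PySem.Dict.mk e).get? "port" with
    | none => exact ih s hs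
    | some v => exact ih _ (PySem.Set.nodup_add _ _ hs)

-- sorting a duplicate-free Int list by the identity is strictly increasing
theorem pv_sorted_pairwise_lt (s : List Int) (hs : s.Nodup) :
    (PySem.List.sorted s (fun x => x) false).Pairwise (· < ·) := by
  have h1 := PySem.List.sorted_pairwise s (fun x => x) (κ := Int)
  have h2 : (PySem.List.sorted s (fun x => x) false).Nodup :=
    ((PySem.List.sorted_perm s (fun x => x) false).nodup_iff).mpr hs
  exact (h1.and h2).imp (fun h => lt_of_le_of_ne h.1 h.2)

-- A's sorted set difference is the filtered sorted key list
theorem pv_sorted_diff_eq (S t : List Int) (hS : S.Nodup) :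
    PySem.List.sorted (PySem.Set.diff S t) (fun x => x) false
      = (PySem.List.sorted S (fun x => x) false).filter (fun x => !(PySem.Set.contains t x)) := by
  apply PySem.List.sorted_eq_of_perm_of_pairwise_lt
  · exact ((PySem.List.sorted_perm S (fun x => x) false).filter _)
  · exact (pv_sorted_pairwise_lt S hS).filter _

-- A's sorted set difference equals B's merge walk over the two sorted lists
theorem pv_nc_eq (S t : List Int) (hS : S.Nodup) (ht : t.Nodup) :
    PySem.List.sorted (PySem.Set.diff S t) (fun x => x) false
      = pvDiffMerge (PySem.List.sorted S (fun x => x) false) (PySem.List.sorted t (fun x => x) false) := by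
  rw [pvDiffMerge_eq_filter _ _ (pv_sorted_pairwise_lt S hS) (pv_sorted_pairwise_lt t ht),
      pv_sorted_diff_eq S t hS]
  apply List.filter_congr
  intro z _
  by_cases hm : z ∈ t
  · simp [PySem.List.mem_sorted, hm]
  · simp [PySem.List.mem_sorted, hm]

-- ===== VERDICT (by name: the statement is the Claim_ definition above) =====
theorem eval_u09_py_spec : Claim_equal_eval_u09_py := by
  intro data wl _ _
  unfold Spec_eval_u09_py eval_u09_py eval_u09_py_alt
  dsimp only
  have hkeys := pv_open_eq_keys ((PySem.Dict.mk data).getD "open_ports" [])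
  have hnodS : ((((PySem.Dict.mk data).getD "open_ports" []).foldl
      (fun d p => d.insert ((((PySem.Dict.mk p).get? "port").bind PySem.Int.ofStr?).getD 0) p)
      PySem.Dict.empty).keys).Nodup :=
    PySem.Dict.nodup_keys_foldl_insert_key _ _ _ _ (by simp)
  have hnodt := pv_allowed_nodup wl PySem.Set.empty List.nodup_nil
  rw [hkeys, pv_nc_eq _ _ hnodS hnodt]
  simp only [PySem.Dict.keys, List.map_eq_nil_iff, ne_eq, ite_not,
    PySem.List.foldl_append_singleton_eq_map, List.nil_append,
    PySem.Dict.getD_eq_get?_getD, ← pv_line_eq]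
  rfl
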